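-- pv_equiv track=rewrite | github.com/vinay-yadav/Introduction_To_DSA | 2. Array/SubArray/6. Counting Subarrays Easy.py | solve
-- ===== SOURCE A (Python) =====
-- def solve(A, B):
--     sub_array_count = 0
--
--     n = len(A)
--
--     for s in range(n):
--         sub_array_sum = 0
--         for e in range(s, n):
--             sub_array_sum += A[e]
--
--             if sub_array_sum < B:
--                 sub_array_count += 1
--     return sub_array_count
-- ===== SOURCE B (Python) =====
-- def solve(A, B):
--     # Prefix-sum formulation: a subarray A[s..e] has sum < B  iff
--     # P[s] > P[e+1] - B, where P are prefix sums.  Scan ends left to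
--     # right, counting qualifying earlier prefixes for each end.
--     count = 0
--     prefix = 0
--     prefixes = [0]
--     for x in A:
--         prefix += x
--         count += sum(1 for q in prefixes if q > prefix - B)
--         prefixes.append(prefix)
--     return count
-- ===== Notes on version B (the rewrite author's own statement) =====
-- stated objective: alternative
-- what changed: Replaces the start-anchored double loop that re-accumulates subarray sums with a prefix-sum scan over ends that counts earlier prefixes exceeding prefix-B.
import Mathlib
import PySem

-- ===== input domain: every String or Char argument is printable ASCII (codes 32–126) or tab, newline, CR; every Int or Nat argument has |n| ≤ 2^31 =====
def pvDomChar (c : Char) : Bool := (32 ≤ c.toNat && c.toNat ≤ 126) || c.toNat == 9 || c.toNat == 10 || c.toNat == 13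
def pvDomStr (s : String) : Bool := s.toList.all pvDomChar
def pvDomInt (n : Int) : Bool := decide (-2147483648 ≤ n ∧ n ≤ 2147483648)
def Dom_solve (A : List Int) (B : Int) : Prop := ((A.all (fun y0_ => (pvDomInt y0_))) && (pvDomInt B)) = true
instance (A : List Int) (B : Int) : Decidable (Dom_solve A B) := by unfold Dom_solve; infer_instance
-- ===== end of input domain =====

-- B replaces A's start-anchored double loop by a prefix-sum scan over ends; alternative decomposition, same cost.

-- ===== PORT A =====
-- literal transliteration of A: outer loop over starts, inner loop re-accumulating the sum.
-- A[e] is always in range here, so pyGetD's default is never used.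
def solve (A : List Int) (B : Int) : Int :=
  let n : Int := A.length
  (PySem.List.pyRange 0 n 1).foldl (fun cnt s =>
    ((PySem.List.pyRange s n 1).foldl
      (fun (st : Int × Int) e =>
        let sum := st.1 + PySem.List.pyGetD A e 0
        (sum, if sum < B then st.2 + 1 else st.2))
      (0, cnt)).2) 0

-- ===== PORT B =====
-- transliteration of Source B: one fold over A carrying (count, prefix, prefixes).
def solve_alt (A : List Int) (B : Int) : Int :=
  (A.foldl (fun (st : Int × Int × List Int) x =>
    let p := st.2.1 + x
    let c := st.1 + (st.2.2.countP (fun q => decide (q > p - B)) : Int)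
    (c, p, st.2.2 ++ [p])) (0, 0, [0])).1

-- ===== PRECONDITION & SPEC =====
def Spec_solve (A : List Int) (B : Int) (out : Int) : Prop := out = solve_alt A B
instance (A : List Int) (B : Int) (out : Int) : Decidable (Spec_solve A B out) := by unfold Spec_solve; infer_instance

-- ===== CLAIM (what is proved, stated in full; the proofs are below) =====
def Claim_equal_solve : Prop := ∀ (A : List Int) (B : Int), Dom_solve A B → Spec_solve A B (solve A B)

-- ===== LEMMAS AND PROOFS =====

-- count of nonempty prefixes of l whose sum (started from s) is < B: A's inner loop as recursion
def cntFrom (B : Int) : Int → List Int → Int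
  | _, [] => 0
  | s, a :: l => (if s + a < B then 1 else 0) + cntFrom B (s + a) l

-- A's whole computation: sum over starts
def specA (B : Int) : List Int → Int
  | [] => 0
  | a :: l => cntFrom B 0 (a :: l) + specA B l

-- nonempty prefix sums of l, offset by p
def prefs (p : Int) : List Int → List Int
  | [] => []
  | x :: l => (p + x) :: prefs (p + x) l

-- B's step function (definitionally the lambda in solve_alt)
def stepB (B : Int) (st : Int × Int × List Int) (x : Int) : Int × Int × List Int :=
  let p := st.2.1 + x
  let c := st.1 + (st.2.2.countP (fun q => decide (q > p - B)) : Int)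
  (c, p, st.2.2 ++ [p])

theorem inner_fold (B : Int) (l : List Int) : ∀ (s0 c0 : Int),
    (l.foldl (fun (st : Int × Int) a =>
      (st.1 + a, if st.1 + a < B then st.2 + 1 else st.2)) (s0, c0)).2
      = c0 + cntFrom B s0 l := by
  induction l with
  | nil => intro s0 c0; simp [cntFrom]
  | cons a l ih =>
      intro s0 c0
      simp only [List.foldl_cons, cntFrom, ih]
      split <;> omega

-- shifting a unit range by one
theorem pyRange_shift_foldl (g : Int → Int → Int) (b c : Int) :
    (PySem.List.pyRange 1 (b + 1) 1).foldl g c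
      = (PySem.List.pyRange 0 b 1).foldl (fun c s => g c (s + 1)) c := by
  rw [PySem.List.pyRange_one 1 (b + 1), PySem.List.pyRange_one 0 b]
  have h : b + 1 - 1 = b - 0 := by ring
  rw [h, List.foldl_map, List.foldl_map]
  apply PySem.List.foldl_congr_mem
  intro acc x _
  congr 1
  ring

theorem outer_fold (B : Int) : ∀ (A : List Int) (c0 : Int),
    (PySem.List.pyRange 0 (A.length : Int) 1).foldl
      (fun c s => c + cntFrom B 0 (A.drop s.toNat)) c0 = c0 + specA B A := by
  intro A
  induction A with
  | nil => intro c0; simp [PySem.List.pyRange_one_eq_nil, specA]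
  | cons a l ih =>
      intro c0
      have hlen : ((a :: l).length : Int) = (l.length : Int) + 1 := by simp
      rw [hlen, PySem.List.pyRange_one_cons (by positivity)]
      simp only [List.foldl_cons]
      rw [show (0 : Int) + 1 = 1 from rfl, pyRange_shift_foldl]
      have hcong : (PySem.List.pyRange 0 (l.length : Int) 1).foldl
          (fun c s => (fun c s => c + cntFrom B 0 ((a :: l).drop s.toNat)) c (s + 1))
          (c0 + cntFrom B 0 (List.drop (0 : Int).toNat (a :: l)))
          = (PySem.List.pyRange 0 (l.length : Int) 1).foldl
          (fun c s => c + cntFrom B 0 (l.drop s.toNat))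
          (c0 + cntFrom B 0 (a :: l)) := by
        apply PySem.List.foldl_congr_mem
        intro acc s hs
        have hs' : 0 ≤ s := (PySem.List.mem_pyRange_one.mp hs).1
        have : (s + 1).toNat = s.toNat + 1 := by omega
        simp [this]
      rw [hcong, ih, specA]
      ring

theorem solve_eq_specA (A : List Int) (B : Int) : solve A B = specA B A := by
  unfold solve
  have hinner : ∀ (cnt s : Int), s ∈ PySem.List.pyRange 0 (A.length : Int) 1 →
      ((PySem.List.pyRange s (A.length : Int) 1).foldl
        (fun (st : Int × Int) e =>
          (st.1 + PySem.List.pyGetD A e 0,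
            if st.1 + PySem.List.pyGetD A e 0 < B then st.2 + 1 else st.2))
        (0, cnt)).2 = cnt + cntFrom B 0 (A.drop s.toNat) := by
    intro cnt s hs
    have hs' : 0 ≤ s := (PySem.List.mem_pyRange_one.mp hs).1
    rw [PySem.List.foldl_pyRange_pyGetD' A 0
      (fun (st : Int × Int) (a : Int) => (st.1 + a, if st.1 + a < B then st.2 + 1 else st.2))
      (0, cnt) (a := s) hs']
    exact inner_fold B (A.drop s.toNat) 0 cnt
  calc (PySem.List.pyRange 0 (A.length : Int) 1).foldl (fun cnt s =>
        ((PySem.List.pyRange s (A.length : Int) 1).foldl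
          (fun (st : Int × Int) e =>
            let sum := st.1 + PySem.List.pyGetD A e 0
            (sum, if sum < B then st.2 + 1 else st.2)) (0, cnt)).2) 0
      = (PySem.List.pyRange 0 (A.length : Int) 1).foldl
          (fun c s => c + cntFrom B 0 (A.drop s.toNat)) 0 := by
        apply PySem.List.foldl_congr_mem
        intro acc s hs
        exact hinner acc s hs
    _ = specA B A := by rw [outer_fold B A 0]; ring

-- ===== B-side characterization =====

theorem prefix_comp (B : Int) : ∀ (l : List Int) (c p : Int) (L : List Int),
    (l.foldl (stepB B) (c, p, L)).2 = (p + l.sum, L ++ prefs p l) := by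
  intro l
  induction l with
  | nil => intro c p L; simp [prefs]
  | cons x l ih =>
      intro c p L
      simp only [List.foldl_cons, stepB, ih, prefs, List.sum_cons]
      simp only [Prod.mk.injEq]
      exact ⟨by ring, by simp⟩

theorem cntFrom_append (B x : Int) : ∀ (l : List Int) (s : Int),
    cntFrom B s (l ++ [x]) = cntFrom B s l + (if s + l.sum + x < B then 1 else 0) := by
  intro l
  induction l with
  | nil => intro s; simp [cntFrom]
  | cons a l ih =>
      intro s
      simp only [List.cons_append, cntFrom, ih, List.sum_cons]
      split_ifs <;> omega

theorem prefs_off : ∀ (l : List Int) (p : Int),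
    prefs p l = (prefs 0 l).map (fun q => p + q) := by
  intro l
  induction l with
  | nil => intro p; simp [prefs]
  | cons x l ih =>
      intro p
      simp only [prefs, List.map_cons, zero_add]
      congr 1
      rw [ih (p + x), ih x, List.map_map]
      apply List.map_congr_left
      intro q _
      simp only [Function.comp_apply]
      ring

theorem countP_prefs_shift (l : List Int) (a T : Int) :
    (prefs a l).countP (fun q => decide (q > a + T))
      = (prefs 0 l).countP (fun q => decide (q > T)) := by
  rw [prefs_off l a, List.countP_map]
  apply List.countP_congr
  intro q _
  simp only [Function.comp_apply, decide_eq_true_eq]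
  omega

theorem specA_append (B x : Int) : ∀ (l : List Int),
    specA B (l ++ [x])
      = specA B l + ((0 :: prefs 0 l).countP (fun q => decide (q > l.sum + x - B)) : Int) := by
  intro l
  induction l with
  | nil =>
      simp only [List.nil_append, specA, cntFrom, prefs, List.sum_nil]
      rw [List.countP_cons]
      simp only [List.countP_nil, decide_eq_true_eq]
      push_cast
      split_ifs <;> omega
  | cons a l ih =>
      have key : specA B ((a :: l) ++ [x]) = cntFrom B 0 ((a :: l) ++ [x]) + specA B (l ++ [x]) := rfl
      rw [key, cntFrom_append B x (a :: l) 0, ih]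
      have hpc : ((0 :: prefs 0 (a :: l)).countP (fun q => decide (q > (a :: l).sum + x - B)) : Int)
          = (if 0 > (a :: l).sum + x - B then 1 else 0)
            + (if a > (a :: l).sum + x - B then 1 else 0)
            + ((prefs 0 l).countP (fun q => decide (q > l.sum + x - B)) : Int) := by
        have : prefs 0 (a :: l) = a :: prefs a l := by simp [prefs]
        rw [this, List.countP_cons, List.countP_cons]
        have hsh : (prefs a l).countP (fun q => decide (q > (a :: l).sum + x - B))
            = (prefs 0 l).countP (fun q => decide (q > l.sum + x - B)) := by
          have h2 : (a :: l).sum + x - B = a + (l.sum + x - B) := by simp [List.sum_cons]; ring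
          rw [h2]
          exact countP_prefs_shift l a (l.sum + x - B)
        rw [hsh]
        simp only [decide_eq_true_eq]
        push_cast
        split_ifs <;> omega
      rw [hpc]
      have h0c : ((0 :: prefs 0 l).countP (fun q => decide (q > l.sum + x - B)) : Int)
          = (if (0:Int) > l.sum + x - B then 1 else 0)
            + ((prefs 0 l).countP (fun q => decide (q > l.sum + x - B)) : Int) := by
        rw [List.countP_cons]
        simp only [decide_eq_true_eq]
        push_cast
        split_ifs <;> omega
      rw [h0c, specA]
      have hsum : (a :: l).sum = a + l.sum := by simp
      split_ifs <;> omega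

theorem alt_eq_specA (B : Int) (A : List Int) :
    (A.foldl (stepB B) (0, 0, [0])).1 = specA B A := by
  induction A using List.reverseRecOn with
  | nil => simp [specA]
  | append_singleton l x ih =>
      rw [List.foldl_append]
      have hst : l.foldl (stepB B) (0, 0, [0])
          = ((l.foldl (stepB B) (0, 0, [0])).1, 0 + l.sum, [0] ++ prefs 0 l) :=
        Prod.ext rfl (prefix_comp B l 0 0 [0])
      rw [hst]
      simp only [List.singleton_append, zero_add]
      rw [ih, specA_append B x l]
      simp only [List.foldl_cons, List.foldl_nil, stepB]

theorem solve_spec : Claim_equal_solve := by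
  intro A B _
  unfold Spec_solve
  have halt : solve_alt A B = (A.foldl (stepB B) (0, 0, [0])).1 := rfl
  rw [halt, alt_eq_specA, solve_eq_specA]
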